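-- pv_equiv track=rewrite | github.com/KirbysGit/taylor.io | backend/generator/shared/tagline.py | _tagline_outer_italic_segments
-- ===== SOURCE A (Python) =====
-- from typing import List, Tuple
--
-- def _tagline_outer_italic_segments(raw: str) -> List[Tuple[bool, str]]:
--     # Initialize the output list.
--     out: List[Tuple[bool, str]] = []
--     i = 0
--     n = len(raw)
--     while i < n:
--         if raw[i] == "_":
--             j = raw.find("_", i + 1)
--             if j != -1 and j > i + 1:
--                 out.append((True, raw[i + 1 : j]))
--                 i = j + 1
--             else:
--                 start = i
--                 i += 1
--                 while i < n and raw[i] != "_":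
--                     i += 1
--                 out.append((False, raw[start:i]))
--         else:
--             start = i
--             while i < n and raw[i] != "_":
--                 i += 1
--             out.append((False, raw[start:i]))
--     return out
-- ===== SOURCE B (Python) =====
-- from typing import List, Tuple
--
-- def _tagline_outer_italic_segments(raw: str) -> List[Tuple[bool, str]]:
--     # One-pass state machine: `open_` = an unmatched '_' is pending, `buf` = chars since last event.
--     out: List[Tuple[bool, str]] = []
--     open_ = False
--     buf: List[str] = []
--     for ch in raw:
--         if ch == "_":
--             if open_:
--                 if buf:
--                     out.append((True, "".join(buf)))
--                     open_ = False
--                 else: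
--                     out.append((False, "_"))
--             else:
--                 if buf:
--                     out.append((False, "".join(buf)))
--                 open_ = True
--             buf = []
--         else:
--             buf.append(ch)
--     if open_:
--         out.append((False, "_" + "".join(buf)))
--     elif buf:
--         out.append((False, "".join(buf)))
--     return out
-- ===== Notes on version B (the rewrite author's own statement) =====
-- stated objective: alternative
-- what changed: A scans with an index, str.find lookahead and two inner skip-loops; B is a single one-pass character-at-a-time state machine (pending-underscore flag plus a buffer) with an epilogue flush.
import Mathlib
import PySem

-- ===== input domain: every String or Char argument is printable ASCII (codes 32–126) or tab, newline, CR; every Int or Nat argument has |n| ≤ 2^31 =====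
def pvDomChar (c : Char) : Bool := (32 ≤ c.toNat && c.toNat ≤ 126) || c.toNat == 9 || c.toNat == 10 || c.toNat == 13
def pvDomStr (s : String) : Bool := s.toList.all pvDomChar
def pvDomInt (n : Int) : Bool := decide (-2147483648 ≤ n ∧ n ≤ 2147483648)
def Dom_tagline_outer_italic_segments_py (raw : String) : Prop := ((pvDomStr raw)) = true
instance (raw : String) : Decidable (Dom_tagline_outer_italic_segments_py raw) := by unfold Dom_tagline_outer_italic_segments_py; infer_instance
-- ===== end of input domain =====

-- B replaces A's lookahead scan (str.find plus inner skip loops) by a one-pass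
-- character-at-a-time state machine; objective: alternative (same cost, a plainer single pass).

-- ===== PORT A =====
-- A's while loop over index i is carried as structural recursion on the remaining suffix of
-- the character list: raw[i] is the head, raw.find("_", i+1) is Chars.find on the tail
-- (relative position: absolute j = i + 1 + relative, so 'j != -1 and j > i + 1' becomes
-- 'j ≠ -1 ∧ 0 < j'), the slice raw[i+1:j] is take, and the two inner
-- 'while i < n and raw[i] != "_"' skip loops are takeWhile/dropWhile of (· ≠ '_'). Exact.
def pvScanA : List Char → List (Bool × List Char)
  | [] => []
  | c :: rest =>
    if c = '_' then
      let j := PySem.Chars.find rest ['_']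
      if j ≠ -1 ∧ 0 < j then
        (true, rest.take j.toNat) :: pvScanA (rest.drop (j.toNat + 1))
      else
        (false, c :: rest.takeWhile (· ≠ '_')) :: pvScanA (rest.dropWhile (· ≠ '_'))
    else
      (false, c :: rest.takeWhile (· ≠ '_')) :: pvScanA (rest.dropWhile (· ≠ '_'))
  termination_by l => l.length
  decreasing_by
  · simp only [List.length_cons, List.length_drop]
    omega
  · simp only [List.length_cons]
    have := List.length_dropWhile_le (p := fun c => decide (c ≠ '_')) (l := rest)
    omega
  · simp only [List.length_cons]
    have := List.length_dropWhile_le (p := fun c => decide (c ≠ '_')) (l := rest)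
    omega

def tagline_outer_italic_segments_py (raw : String) : List (Bool × String) :=
  (pvScanA raw.toList).map (fun p => (p.1, String.ofList p.2))

-- ===== PORT B =====
-- state: (out so far, open_ flag, buf); python's out.append / buf.append are ++ [·]
def pvStepB (st : List (Bool × List Char) × Bool × List Char) (ch : Char) :
    List (Bool × List Char) × Bool × List Char :=
  let (out, opn, buf) := st
  if ch = '_' then
    if opn then
      if buf ≠ [] then (out ++ [(true, buf)], false, [])
      else (out ++ [(false, ['_'])], opn, [])
    else
      ((if buf ≠ [] then out ++ [(false, buf)] else out), true, [])
  else (out, opn, buf ++ [ch])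

-- the 'if open_: … elif buf: …' epilogue after the loop
def pvFinB (st : List (Bool × List Char) × Bool × List Char) : List (Bool × List Char) :=
  let (out, opn, buf) := st
  if opn then out ++ [(false, '_' :: buf)]
  else if buf ≠ [] then out ++ [(false, buf)] else out

def tagline_outer_italic_segments_py_alt (raw : String) : List (Bool × String) :=
  (pvFinB (raw.toList.foldl pvStepB ([], false, []))).map (fun p => (p.1, String.ofList p.2))

-- ===== PRECONDITION & SPEC =====
def Spec_tagline_outer_italic_segments_py (raw : String) (out : List (Bool × String)) : Prop := out = tagline_outer_italic_segments_py_alt raw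
instance (raw : String) (out : List (Bool × String)) : Decidable (Spec_tagline_outer_italic_segments_py raw out) := by unfold Spec_tagline_outer_italic_segments_py; infer_instance

-- ===== CLAIM (what is proved, stated in full; the proofs are below) =====
def Claim_equal_tagline_outer_italic_segments_py : Prop := ∀ (raw : String), Dom_tagline_outer_italic_segments_py raw → Spec_tagline_outer_italic_segments_py raw (tagline_outer_italic_segments_py raw)

-- ===== LEMMAS AND PROOFS =====

-- takeWhile/dropWhile of (· ≠ '_') across an underscore-free prefix
theorem pv_tw_no (r : List Char) (h : '_' ∉ r) : r.takeWhile (· ≠ '_') = r := by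
  induction r with
  | nil => rfl
  | cons c t ih =>
    have hc : c ≠ '_' := fun hc => h (by simp [hc])
    simp only [List.takeWhile_cons]
    rw [if_pos (by simpa using hc), ih (fun hm => h (List.mem_cons_of_mem _ hm))]

theorem pv_dw_no (r : List Char) (h : '_' ∉ r) : r.dropWhile (· ≠ '_') = [] := by
  induction r with
  | nil => rfl
  | cons c t ih =>
    have hc : c ≠ '_' := fun hc => h (by simp [hc])
    simp only [List.dropWhile_cons]
    rw [if_pos (by simpa using hc), ih (fun hm => h (List.mem_cons_of_mem _ hm))]

theorem pv_tw_at (pre l : List Char) (h : '_' ∉ pre) :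
    (pre ++ '_' :: l).takeWhile (· ≠ '_') = pre := by
  induction pre with
  | nil => simp
  | cons c t ih =>
    have hc : c ≠ '_' := fun hc => h (by simp [hc])
    simp only [List.cons_append, List.takeWhile_cons]
    rw [if_pos (by simpa using hc), ih (fun hm => h (List.mem_cons_of_mem _ hm))]

theorem pv_dw_at (pre l : List Char) (h : '_' ∉ pre) :
    (pre ++ '_' :: l).dropWhile (· ≠ '_') = '_' :: l := by
  induction pre with
  | nil => simp
  | cons c t ih =>
    have hc : c ≠ '_' := fun hc => h (by simp [hc])
    simp only [List.cons_append, List.dropWhile_cons]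
    rw [if_pos (by simpa using hc), ih (fun hm => h (List.mem_cons_of_mem _ hm))]

-- find on a list not containing the needle character
theorem pv_find_no (r : List Char) (h : '_' ∉ r) : PySem.Chars.find r ['_'] = -1 := by
  rw [PySem.Chars.find_eq_neg_one_iff]
  intro hinf
  exact h (hinf.mem (by simp))

-- find.go locates the first occurrence past an underscore-free prefix
theorem pv_findgo_at (pre l : List Char) (h : '_' ∉ pre) (k : Nat) :
    PySem.Chars.find.go ['_'] (pre ++ '_' :: l) k = (k : Int) + pre.length := by
  induction pre generalizing k with
  | nil => simp [PySem.Chars.find.go, List.isPrefixOf]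
  | cons c pre ih =>
    have hc : c ≠ '_' := fun hc => h (by simp [hc])
    rw [List.cons_append, PySem.Chars.find.go]
    rw [if_neg (by simp [List.isPrefixOf]; exact fun h => hc h.symm),
      ih (fun hm => h (List.mem_cons_of_mem _ hm)) (k + 1)]
    simp only [List.length_cons]
    push_cast; ring

theorem pv_find_at (pre l : List Char) (h : '_' ∉ pre) :
    PySem.Chars.find (pre ++ '_' :: l) ['_'] = pre.length := by
  have := pv_findgo_at pre l h 0
  simpa [PySem.Chars.find] using this

-- evaluation shapes of one step of B
theorem pvStepB_us_closed_nil : pvStepB ([], false, []) '_' = ([], true, []) := by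
  simp [pvStepB]

theorem pvStepB_us_closed (b : Char) (t : List Char) :
    pvStepB ([], false, b :: t) '_' = ([(false, b :: t)], true, []) := by
  simp [pvStepB]

theorem pvStepB_us_open_nil : pvStepB ([], true, []) '_' = ([(false, ['_'])], true, []) := by
  simp [pvStepB]

theorem pvStepB_us_open (b : Char) (t : List Char) :
    pvStepB ([], true, b :: t) '_' = ([(true, b :: t)], false, []) := by
  simp [pvStepB]

theorem pvStepB_other (opn : Bool) (buf : List Char) (ch : Char) (h : ch ≠ '_') :
    pvStepB ([], opn, buf) ch = ([], opn, buf ++ [ch]) := by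
  simp [pvStepB, h]

-- every step appends to `out` a chunk that does not depend on `out`
theorem pv_step_shape (out : List (Bool × List Char)) (opn : Bool) (buf : List Char)
    (ch : Char) :
    ∃ δ o' b', pvStepB (out, opn, buf) ch = (out ++ δ, o', b') ∧
      pvStepB ([], opn, buf) ch = (δ, o', b') := by
  by_cases hch : ch = '_'
  · cases opn with
    | false =>
      by_cases hb : buf = []
      · exact ⟨[], true, [], by simp [pvStepB, hch, hb], by simp [pvStepB, hch, hb]⟩
      · exact ⟨[(false, buf)], true, [], by simp [pvStepB, hch, hb], by simp [pvStepB, hch, hb]⟩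
    | true =>
      by_cases hb : buf = []
      · exact ⟨[(false, ['_'])], true, [], by simp [pvStepB, hch, hb], by simp [pvStepB, hch, hb]⟩
      · exact ⟨[(true, buf)], false, [], by simp [pvStepB, hch, hb], by simp [pvStepB, hch, hb]⟩
  · exact ⟨[], opn, buf ++ [ch], by simp [pvStepB, hch], by simp [pvStepB, hch]⟩

-- the fold only ever appends to `out`: pull the accumulated prefix out front
theorem pvFinB_foldl_out (l : List Char) (out : List (Bool × List Char)) (opn : Bool)
    (buf : List Char) :
    pvFinB (l.foldl pvStepB (out, opn, buf)) =
      out ++ pvFinB (l.foldl pvStepB ([], opn, buf)) := by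
  induction l generalizing out opn buf with
  | nil =>
    cases opn with
    | false => simp only [List.foldl_nil, pvFinB]; simp only [Bool.false_eq_true, if_false]; split <;> simp
    | true => simp [pvFinB]
  | cons c l ih =>
    obtain ⟨d, o', b', h1, h2⟩ := pv_step_shape out opn buf c
    rw [List.foldl_cons, List.foldl_cons, h1, h2, ih (out ++ d) o' b', ih d o' b',
      List.append_assoc]

-- evaluation shapes of A's scan
theorem pvScanA_other (c : Char) (rest : List Char) (h : c ≠ '_') :
    pvScanA (c :: rest) =
      (false, c :: rest.takeWhile (· ≠ '_')) :: pvScanA (rest.dropWhile (· ≠ '_')) := by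
  rw [pvScanA, if_neg h]

theorem pvScanA_us (rest : List Char) :
    pvScanA ('_' :: rest) =
      if PySem.Chars.find rest ['_'] ≠ -1 ∧ 0 < PySem.Chars.find rest ['_'] then
        (true, rest.take (PySem.Chars.find rest ['_']).toNat) ::
          pvScanA (rest.drop ((PySem.Chars.find rest ['_']).toNat + 1))
      else
        (false, '_' :: rest.takeWhile (· ≠ '_')) :: pvScanA (rest.dropWhile (· ≠ '_')) := by
  rw [pvScanA, if_pos rfl]

-- joint invariant: closed state with underscore-free buffer buf = A's scan of buf ++ l;
-- open state with underscore-free pending content pre = A's scan of '_' :: pre ++ l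
theorem pv_main (l : List Char) :
    (∀ buf : List Char, '_' ∉ buf →
        pvFinB (l.foldl pvStepB (([] : List (Bool × List Char)), false, buf)) =
          pvScanA (buf ++ l)) ∧
    (∀ pre : List Char, '_' ∉ pre →
        pvFinB (l.foldl pvStepB (([] : List (Bool × List Char)), true, pre)) =
          pvScanA ('_' :: (pre ++ l))) := by
  induction l with
  | nil =>
    constructor
    · intro buf hb
      cases buf with
      | nil => simp [pvFinB, pvScanA]
      | cons b t =>
        have hb1 : b ≠ '_' := fun h => hb (by simp [h])
        have ht : '_' ∉ t := fun hm => hb (List.mem_cons_of_mem _ hm)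
        rw [List.foldl_nil, List.append_nil, pvScanA_other b t hb1,
          pv_tw_no t ht, pv_dw_no t ht, pvScanA]
        simp [pvFinB]
    · intro pre hp
      rw [List.foldl_nil, List.append_nil, pvScanA_us,
        if_neg (by simp [pv_find_no pre hp]),
        pv_tw_no pre hp, pv_dw_no pre hp, pvScanA]
      simp [pvFinB]
  | cons c l ih =>
    by_cases hc : c = '_'
    · subst hc
      constructor
      · intro buf hb
        rw [List.foldl_cons]
        cases buf with
        | nil =>
          rw [pvStepB_us_closed_nil]
          simpa using ih.2 [] (by simp)
        | cons b t =>
          have hb1 : b ≠ '_' := fun h => hb (by simp [h])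
          have ht : '_' ∉ t := fun hm => hb (List.mem_cons_of_mem _ hm)
          rw [pvStepB_us_closed, pvFinB_foldl_out, ih.2 [] (by simp),
            show (b :: t) ++ '_' :: l = b :: (t ++ '_' :: l) by simp,
            pvScanA_other b _ hb1, pv_tw_at t l ht, pv_dw_at t l ht]
          simp
      · intro pre hp
        rw [List.foldl_cons]
        cases pre with
        | nil =>
          have hf : PySem.Chars.find ('_' :: l) ['_'] = 0 := by
            simpa using pv_find_at [] l (by simp)
          rw [pvStepB_us_open_nil, pvFinB_foldl_out, ih.2 [] (by simp)]
          simp only [List.nil_append]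
          rw [pvScanA_us ('_' :: l), if_neg (by simp [hf])]
          simp
        | cons b t =>
          have ht : '_' ∉ t := fun hm => hp (List.mem_cons_of_mem _ hm)
          have hfind : PySem.Chars.find (b :: (t ++ '_' :: l)) ['_'] = ((b :: t).length : Int) := by
            have := pv_find_at (b :: t) l hp
            rwa [List.cons_append] at this
          rw [pvStepB_us_open, pvFinB_foldl_out, ih.1 [] (by simp)]
          simp only [List.nil_append, List.cons_append]
          rw [pvScanA_us, hfind, if_pos (by refine ⟨?_, ?_⟩ <;> (simp only [List.length_cons]; push_cast; omega))]
          have htake : (b :: (t ++ '_' :: l)).take ((b :: t).length : Int).toNat = b :: t := by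
            rw [Int.toNat_natCast, show b :: (t ++ '_' :: l) = (b :: t) ++ '_' :: l from rfl]
            exact List.take_left
          have hdrop : (b :: (t ++ '_' :: l)).drop (((b :: t).length : Int).toNat + 1) = l := by
            rw [Int.toNat_natCast,
              show b :: (t ++ '_' :: l) = ((b :: t) ++ ['_']) ++ l by simp,
              show (b :: t).length + 1 = ((b :: t) ++ ['_']).length by simp]
            exact List.drop_left
          rw [htake, hdrop]
    · constructor
      · intro buf hb
        rw [List.foldl_cons, pvStepB_other _ _ _ hc,
          ih.1 (buf ++ [c]) (by simp [hb]; exact fun h => hc h.symm)]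
        simp
      · intro pre hp
        rw [List.foldl_cons, pvStepB_other _ _ _ hc,
          ih.2 (pre ++ [c]) (by simp [hp]; exact fun h => hc h.symm)]
        simp

-- ===== VERDICT (by name: the statement is the Claim_ definition above) =====
theorem tagline_outer_italic_segments_py_spec : Claim_equal_tagline_outer_italic_segments_py := by
  intro raw _
  unfold Spec_tagline_outer_italic_segments_py
  unfold tagline_outer_italic_segments_py tagline_outer_italic_segments_py_alt
  rw [(pv_main raw.toList).1 [] (by simp)]
  simp
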